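-- pv_equiv track=rewrite | github.com/NYOONJEONG/Baekjoon-Programmers | 프로그래머스/2/87946. 피로도/피로도.py | solution
-- ===== SOURCE A (Python) =====
-- from itertools import permutations
--
-- def solution(k, dungeons):
--     answer = -1
--     possible = list(permutations(dungeons,len(dungeons)))
--     for lst in possible:
--         k_lst = k
--         cnt= 0
--         for l in lst:
--             minimum, usage = l[0],l[1]
--             if k_lst>=minimum:
--                 k_lst -= usage
--                 cnt +=1
--             else:
--                 break
--         answer= max(cnt, answer)
--     return answer
-- ===== SOURCE B (Python) =====
-- def solution(k, dungeons):
--     # DFS over "pick one clearable dungeon, recurse on the rest" instead of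
--     # enumerating all permutations.
--     def best(k, ds):
--         r = 0
--         for i, d in enumerate(ds):
--             if k >= d[0]:
--                 r = max(r, 1 + best(k - d[1], ds[:i] + ds[i+1:]))
--         return r
--     return best(k, dungeons)
-- ===== Notes on version B (the rewrite author's own statement) =====
-- stated objective: faster
-- what changed: Replaced exhaustive enumeration of all n! permutations (each rescanned from scratch) with a pruned DFS that picks one affordable dungeon and recurses on the remaining list, never extending an already-failed prefix.
import Mathlib
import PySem

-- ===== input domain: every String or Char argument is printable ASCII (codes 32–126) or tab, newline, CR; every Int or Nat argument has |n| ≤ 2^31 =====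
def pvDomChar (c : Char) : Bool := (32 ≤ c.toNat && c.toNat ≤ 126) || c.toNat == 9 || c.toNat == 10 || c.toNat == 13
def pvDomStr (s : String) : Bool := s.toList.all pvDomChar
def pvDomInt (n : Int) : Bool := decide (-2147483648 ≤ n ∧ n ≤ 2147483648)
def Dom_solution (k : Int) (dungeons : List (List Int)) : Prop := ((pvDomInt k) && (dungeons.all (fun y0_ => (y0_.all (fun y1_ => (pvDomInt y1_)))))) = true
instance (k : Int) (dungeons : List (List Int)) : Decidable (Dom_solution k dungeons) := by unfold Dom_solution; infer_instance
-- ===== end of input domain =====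

-- B replaces the full-permutation scan with a pruned DFS (pick one affordable
-- dungeon, recurse on the rest); equivalence of the two is proved below.

-- pvSel l lists every (element, rest-of-list) selection of l, in order:
-- pvSel l = [(l[i], l[:i] ++ l[i+1:]) for i in range(len(l))].
def pvSel {α : Type} : List α → List (α × List α)
  | [] => []
  | x :: xs => (x, xs) :: (pvSel xs).map (fun p => (p.1, x :: p.2))

-- termination helper for the two recursions below
theorem pvSel_length {α : Type} : ∀ (l : List α) (p : α × List α), p ∈ pvSel l → p.2.length + 1 = l.length := by
  intro l
  induction l with
  | nil => intro p hp; simp [pvSel] at hp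
  | cons x xs ih =>
    intro p hp
    simp only [pvSel, List.mem_cons, List.mem_map] at hp
    rcases hp with h | ⟨q, hq, rfl⟩
    · subst h; simp
    · have := ih q hq; simp; omega

-- ===== PORT A =====
-- itertools.permutations(l, len(l)): choose each element (in order) as head,
-- followed by every permutation of the remaining elements.
def pvPerms : List (List Int) → List (List (List Int))
  | [] => [[]]
  | x :: xs =>
    (pvSel (x :: xs)).attach.flatMap (fun p => (pvPerms p.1.2).map (fun q => p.1.1 :: q))
termination_by l => l.length
decreasing_by
  have := pvSel_length _ _ p.2; simp at *; omega

-- the inner 'for l in lst' loop with its break; l[0]/l[1] via pyGetD, exact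
-- under Pre_solution (every inner list has length ≥ 2, else Python raises)
def pvRun (k : Int) : List (List Int) → Int
  | [] => 0
  | l :: ls =>
    if k ≥ PySem.List.pyGetD l 0 0 then 1 + pvRun (k - PySem.List.pyGetD l 1 0) ls else 0

def solution (k : Int) (dungeons : List (List Int)) : Int :=
  (pvPerms dungeons).foldl (fun answer lst => max (pvRun k lst) answer) (-1)

-- ===== PORT B =====
def pvBest (k : Int) (ds : List (List Int)) : Int :=
  (pvSel ds).attach.foldl
    (fun r p =>
      if k ≥ PySem.List.pyGetD p.1.1 0 0 then
        max r (1 + pvBest (k - PySem.List.pyGetD p.1.1 1 0) p.1.2)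
      else r) 0
termination_by ds.length
decreasing_by
  have := pvSel_length _ _ p.2; omega

def solution_alt (k : Int) (dungeons : List (List Int)) : Int :=
  pvBest k dungeons

-- ===== PRECONDITION & SPEC =====
-- Pre_ excludes dungeons containing an inner list of length < 2: there Python A
-- (and Python B) raise IndexError on l[0]/l[1].
def Pre_solution (k : Int) (dungeons : List (List Int)) : Prop :=
  ∀ l ∈ dungeons, 2 ≤ l.length
instance (k : Int) (dungeons : List (List Int)) : Decidable (Pre_solution k dungeons) := by
  unfold Pre_solution; infer_instance

def pvWitness_solution : Int × List (List Int) := (10, [[5, 3], [4, 2]])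

def Spec_solution (k : Int) (dungeons : List (List Int)) (out : Int) : Prop := out = solution_alt k dungeons
instance (k : Int) (dungeons : List (List Int)) (out : Int) : Decidable (Spec_solution k dungeons out) := by unfold Spec_solution; infer_instance

-- ===== CLAIM (what is proved, stated in full; the proofs are below) =====
def Claim_equal_solution : Prop := ∀ (k : Int) (dungeons : List (List Int)), Dom_solution k dungeons → Pre_solution k dungeons → Spec_solution k dungeons (solution k dungeons)


-- ===== LEMMAS AND PROOFS =====

-- remove the .attach that only serves termination
theorem pvPerms_cons (x : List Int) (xs : List (List Int)) :
    pvPerms (x :: xs) = (pvSel (x :: xs)).flatMap (fun p => (pvPerms p.2).map (fun q => p.1 :: q)) := by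
  rw [pvPerms]
  conv_rhs => rw [← List.attach_map_subtype_val (pvSel (x :: xs))]
  rw [List.flatMap_map]

theorem pvBest_eq (k : Int) (ds : List (List Int)) :
    pvBest k ds = (pvSel ds).foldl
      (fun r p =>
        if k ≥ PySem.List.pyGetD p.1 0 0 then
          max r (1 + pvBest (k - PySem.List.pyGetD p.1 1 0) p.2)
        else r) 0 := by
  rw [pvBest]
  exact List.foldl_attach (l := pvSel ds) (f := fun (r : Int) (p : List Int × List (List Int)) =>
    if k ≥ PySem.List.pyGetD p.1 0 0 then
      max r (1 + pvBest (k - PySem.List.pyGetD p.1 1 0) p.2)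
    else r) (b := 0)

theorem pvPerms_ne_nil : ∀ (l : List (List Int)), pvPerms l ≠ [] := by
  intro l
  induction l with
  | nil => simp [pvPerms]
  | cons x xs ih =>
    rw [pvPerms_cons]
    simp [pvSel, ih]

-- the per-selection score of B
def pvScore (k : Int) (p : List Int × List (List Int)) : Int :=
  if k ≥ PySem.List.pyGetD p.1 0 0 then 1 + pvBest (k - PySem.List.pyGetD p.1 1 0) p.2 else 0

theorem pvBest_nonneg (k : Int) (ds : List (List Int)) : 0 ≤ pvBest k ds := by
  rw [pvBest_eq]
  have h : ∀ (L : List (List Int × List (List Int))) (r : Int), 0 ≤ r →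
      0 ≤ L.foldl (fun r p => if k ≥ PySem.List.pyGetD p.1 0 0 then
          max r (1 + pvBest (k - PySem.List.pyGetD p.1 1 0) p.2) else r) r := by
    intro L
    induction L with
    | nil => intro r hr; simpa using hr
    | cons p L ih =>
      intro r hr
      simp only [List.foldl_cons]
      apply ih
      split
      · omega
      · exact hr
  exact h _ 0 le_rfl

-- B's fold (which skips unaffordable dungeons) equals the max-of-scores fold
theorem pvBest_as_score (k : Int) (ds : List (List Int)) :
    pvBest k ds = (pvSel ds).foldl (fun r p => max r (pvScore k p)) 0 := by
  rw [pvBest_eq]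
  have h : ∀ (L : List (List Int × List (List Int))) (r : Int), 0 ≤ r →
      L.foldl (fun r p => if k ≥ PySem.List.pyGetD p.1 0 0 then
          max r (1 + pvBest (k - PySem.List.pyGetD p.1 1 0) p.2) else r) r
        = L.foldl (fun r p => max r (pvScore k p)) r := by
    intro L
    induction L with
    | nil => intro r _; rfl
    | cons p L ih =>
      intro r hr
      simp only [List.foldl_cons, pvScore]
      split
      · exact ih _ (le_trans hr (le_max_left _ _))
      · rw [max_eq_left hr]
        exact ih _ hr
  exact h _ 0 le_rfl

theorem pvScore_nonneg (k : Int) (p : List Int × List (List Int)) : 0 ≤ pvScore k p := by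
  unfold pvScore
  split
  · have := pvBest_nonneg (k - PySem.List.pyGetD p.1 1 0) p.2; omega
  · omega

-- distributing a constant summand out of a running max
theorem pvFoldlMax {α : Type} (s : α → Int) (c : Int) :
    ∀ (M : List α) (a b : Int),
      M.foldl (fun a' x => max a' (c + s x)) (max a (c + b))
        = max a (c + M.foldl (fun r x => max r (s x)) b) := by
  intro M
  induction M with
  | nil => intro a b; rfl
  | cons x M ih =>
    intro a b
    simp only [List.foldl_cons]
    rw [show max (max a (c + b)) (c + s x) = max a (c + max b (s x)) by omega, ih]

-- a fold of a constant max over a nonempty list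
theorem pvFoldlConst {α : Type} (c : Int) :
    ∀ (M : List α) (a : Int), M.foldl (fun ans _ => max c ans) a
      = if M = [] then a else max c a := by
  intro M
  induction M with
  | nil => intro a; rfl
  | cons y M ih =>
    intro a
    simp only [List.foldl_cons, ih]
    by_cases h : M = [] <;> simp [h]

-- main lemma: folding run-values over all permutations computes B's DFS value
theorem pvMainN : ∀ (n : Nat) (ds : List (List Int)), ds.length = n → ∀ (c k a : Int),
    (pvPerms ds).foldl (fun ans p => max (c + pvRun k p) ans) a = max a (c + pvBest k ds) := by
  intro n
  induction n using Nat.strong_induction_on with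
  | _ n IH =>
    intro ds hds c k a
    cases ds with
    | nil =>
      have hb : pvBest k [] = 0 := by rw [pvBest_eq]; rfl
      simp [pvPerms, pvRun, hb, max_comm]
    | cons x xs =>
      rw [pvPerms_cons]
      have key : ∀ (L : List (List Int × List (List Int))),
          (∀ p ∈ L, p.2.length < n) → ∀ a : Int,
          (L.flatMap (fun p => (pvPerms p.2).map (fun q => p.1 :: q))).foldl
              (fun ans p => max (c + pvRun k p) ans) a
            = L.foldl (fun a' p => max a' (c + pvScore k p)) a := by
        intro L
        induction L with
        | nil => intro _ a; rfl
        | cons p L ihL =>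
          intro hlen a
          simp only [List.flatMap_cons, List.foldl_append, List.foldl_cons]
          have hchunk : ((pvPerms p.2).map (fun q => p.1 :: q)).foldl
              (fun ans q => max (c + pvRun k q) ans) a = max a (c + pvScore k p) := by
            rw [List.foldl_map]
            unfold pvScore
            by_cases hfeas : k ≥ PySem.List.pyGetD p.1 0 0
            · simp only [pvRun, if_pos hfeas]
              have hsh : ∀ (ans : Int) (q : List (List Int)),
                  max (c + (1 + pvRun (k - PySem.List.pyGetD p.1 1 0) q)) ans
                    = max ((c + 1) + pvRun (k - PySem.List.pyGetD p.1 1 0) q) ans := by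
                intro ans q; ring_nf
              simp only [hsh]
              rw [IH p.2.length (hlen p (by simp)) p.2 rfl (c + 1)
                    (k - PySem.List.pyGetD p.1 1 0) a]
              ring_nf
            · simp only [pvRun, if_neg hfeas, add_zero]
              rw [pvFoldlConst c (pvPerms p.2) a, if_neg (pvPerms_ne_nil p.2)]
              exact max_comm c a
          rw [hchunk, ihL (fun q hq => hlen q (by simp [hq]))]
      rw [key _ (by intro p hp; have := pvSel_length _ _ hp; omega)]
      have hsel : pvSel (x :: xs) = (x, xs) :: (pvSel xs).map (fun p => (p.1, x :: p.2)) := rfl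
      rw [pvBest_as_score, hsel]
      simp only [List.foldl_cons]
      rw [show c + pvScore k (x, xs) = c + max 0 (pvScore k (x, xs)) by
        rw [max_eq_right (pvScore_nonneg k _)]]
      exact pvFoldlMax (pvScore k) c _ a (max 0 (pvScore k (x, xs)))

-- ===== VERDICT (by name: the statement is the Claim_ definition above) =====
theorem solution_spec : Claim_equal_solution := by
  intro k dungeons _ _
  unfold Spec_solution solution solution_alt
  have h : (fun (ans : Int) (lst : List (List Int)) => max (pvRun k lst) ans)
      = (fun ans lst => max ((0 : Int) + pvRun k lst) ans) := by
    funext ans lst; rw [zero_add]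
  rw [h, pvMainN dungeons.length dungeons rfl 0 k (-1), zero_add,
    max_eq_right (le_trans (by norm_num) (pvBest_nonneg k dungeons))]
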